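-- pv_equiv track=rewrite | github.com/sagarneeli/coding-challenges | Other/cube.py | find_block_ordering
-- ===== SOURCE A (Python) =====
-- def find_block_ordering(blocks, message):
--     def can_spell(block, char):
--         return char in block
--
--     def backtrack(index, current_ordering):
--         if index == len(message):
--             return current_ordering
--
--         for i, block in enumerate(blocks):
--             if i not in current_ordering and can_spell(block, message[index]):
--                 new_ordering = current_ordering + [i]
--                 result = backtrack(index + 1, new_ordering)
--                 if result:
--                     return result
--         return None
--
--     return backtrack(0, [])
-- ===== SOURCE B (Python) =====
-- def find_block_ordering(blocks, message):
--     # Build, once, the (increasing) list of block indices able to spell each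
--     # distinct character of the message; the per-position scan over all blocks
--     # then disappears from the search.
--     candidates = {}
--     for ch in message:
--         if ch not in candidates:
--             candidates[ch] = [i for i, b in enumerate(blocks) if ch in b]
--
--     used = set()
--
--     def solve(index):
--         if index == len(message):
--             return []
--         for i in candidates[message[index]]:
--             if i not in used:
--                 used.add(i)
--                 suffix = solve(index + 1)
--                 if suffix is not None:
--                     return [i] + suffix
--                 used.discard(i)
--         return None
--
--     return solve(0)
-- ===== Notes on version B (the rewrite author's own statement) =====
-- stated objective: alternative
-- what changed: B builds a per-character index of candidate blocks once (a dict char -> increasing block indices) and searches over those candidate lists with an O(1)-membership used-set, building the answer back-to-front by consing, instead of A's rescanning of all blocks (and a linear 'i not in current_ordering' list scan) at every position of every branch.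
import Mathlib
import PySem

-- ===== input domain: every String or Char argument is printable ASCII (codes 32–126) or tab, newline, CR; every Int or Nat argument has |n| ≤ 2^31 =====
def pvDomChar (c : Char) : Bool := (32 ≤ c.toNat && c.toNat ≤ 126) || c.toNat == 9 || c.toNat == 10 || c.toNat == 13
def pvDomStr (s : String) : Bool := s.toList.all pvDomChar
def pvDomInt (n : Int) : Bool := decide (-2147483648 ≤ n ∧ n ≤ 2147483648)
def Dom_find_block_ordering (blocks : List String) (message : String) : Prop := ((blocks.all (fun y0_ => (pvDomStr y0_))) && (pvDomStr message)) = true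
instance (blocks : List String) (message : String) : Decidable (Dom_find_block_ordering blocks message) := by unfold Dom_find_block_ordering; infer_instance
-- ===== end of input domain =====

-- B replaces A's per-position scan over all blocks by a per-character index of
-- candidate blocks built once; same return value, constant-factor change only.

-- ===== PORT A =====
-- 'char in block' (single-character substring test)
def pvCanSpell (block : String) (c : Char) : Bool :=
  PySem.Str.isIn (String.ofList [c]) block

lemma pvIdxLt {α : Type} {l : List α} {i : Nat} {a : α} (h : l[i]? = some a) : i < l.length := by
  obtain ⟨hl, -⟩ := List.getElem?_eq_some_iff.mp h; exact hl

mutual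
-- A's backtrack(index, current_ordering)
def pvBacktrack (blocks : List String) (msg : List Char) (index : Nat) (cur : List Int) : Option (List Int) :=
  if index = msg.length then some cur
  else
    match h : msg[index]? with
    | none => none  -- unreachable: index < len(message) here
    | some c => pvLoopA blocks msg index cur c (PySem.List.enumerate blocks 0) (pvIdxLt h)
termination_by (msg.length - index, blocks.length + 1)
decreasing_by
  simp [Prod.lex_iff, PySem.List.length_enumerate]
-- A's 'for i, block in enumerate(blocks): …'  (hidx is a totality guard only)
def pvLoopA (blocks : List String) (msg : List Char) (index : Nat) (cur : List Int) (c : Char)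
    (l : List (Int × String)) (hidx : index < msg.length) : Option (List Int) :=
  match l with
  | [] => none
  | (i, b) :: rest =>
    if !(cur.contains i) && pvCanSpell b c then
      match pvBacktrack blocks msg (index + 1) (cur ++ [i]) with
      | some r => if r.isEmpty then pvLoopA blocks msg index cur c rest hidx else some r  -- Python 'if result:'
      | none => pvLoopA blocks msg index cur c rest hidx
    else pvLoopA blocks msg index cur c rest hidx
termination_by (msg.length - index, l.length)
decreasing_by
  all_goals (simp [Prod.lex_iff]; try omega)
end

def find_block_ordering (blocks : List String) (message : String) : Option (List Int) :=
  pvBacktrack blocks message.toList 0 []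

-- ===== PORT B =====
-- B's candidate index: for each distinct char of the message (first occurrence
-- order), the block indices that can spell it.
def pvBuildCands (blocks : List String) (message : String) : PySem.Dict Char (List Int) :=
  message.toList.foldl
    (fun d ch =>
      if d.contains ch then d
      else d.insert ch
        (((PySem.List.enumerate blocks 0).filter
            (fun p => PySem.Str.isIn (String.ofList [ch]) p.2)).map (·.1)))
    PySem.Dict.empty

mutual
-- B's solve(index) with the mutable 'used' set threaded through
def pvSolve (cands : PySem.Dict Char (List Int)) (msg : List Char) (index : Nat)
    (used : PySem.Set Int) : Option (List Int) :=
  if index = msg.length then some []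
  else
    match h : msg[index]? with
    | none => none  -- unreachable
    | some c =>
      match cands.get? c with
      | none => none  -- unreachable: every message char is a key
      | some l => pvLoopB cands msg index used l (pvIdxLt h)
termination_by (msg.length - index, 1, 0)
decreasing_by
  simp [Prod.lex_iff]
-- B's 'for i in candidates[message[index]]: …'  (hidx is a totality guard only)
def pvLoopB (cands : PySem.Dict Char (List Int)) (msg : List Char) (index : Nat)
    (used : PySem.Set Int) (l : List Int) (hidx : index < msg.length) : Option (List Int) :=
  match l with
  | [] => none
  | i :: rest =>
    if used.contains i then pvLoopB cands msg index used rest hidx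
    else
      match pvSolve cands msg (index + 1) (PySem.Set.add used i) with
      | some suffix => some (i :: suffix)
      | none => pvLoopB cands msg index used rest hidx
termination_by (msg.length - index, 0, l.length)
decreasing_by
  all_goals (simp [Prod.lex_iff]; try omega)
end

def find_block_ordering_alt (blocks : List String) (message : String) : Option (List Int) :=
  pvSolve (pvBuildCands blocks message) message.toList 0 PySem.Set.empty

-- ===== PRECONDITION & SPEC =====
def Spec_find_block_ordering (blocks : List String) (message : String) (out : Option (List Int)) : Prop := out = find_block_ordering_alt blocks message
instance (blocks : List String) (message : String) (out : Option (List Int)) : Decidable (Spec_find_block_ordering blocks message out) := by unfold Spec_find_block_ordering; infer_instance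

-- ===== CLAIM (what is proved, stated in full; the proofs are below) =====
def Claim_equal_find_block_ordering : Prop := ∀ (blocks : List String) (message : String), Dom_find_block_ordering blocks message → Spec_find_block_ordering blocks message (find_block_ordering blocks message)

-- ===== LEMMAS AND PROOFS =====

-- the candidate list B's dict stores for a character c
def pvCandList (blocks : List String) (c : Char) : List Int :=
  ((PySem.List.enumerate blocks 0).filter
      (fun p => PySem.Str.isIn (String.ofList [c]) p.2)).map (·.1)

-- one step of B's dict-building loop
def pvStep (blocks : List String) (d : PySem.Dict Char (List Int)) (ch : Char) :
    PySem.Dict Char (List Int) :=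
  if d.contains ch then d else d.insert ch (pvCandList blocks ch)

lemma pvBuildCands_eq_foldl (blocks : List String) (message : String) :
    pvBuildCands blocks message = message.toList.foldl (pvStep blocks) PySem.Dict.empty := rfl

-- the dict-building invariant: every stored value is the candidate list of its key
lemma pvStep_inv (blocks : List String) (chars : List Char) (d : PySem.Dict Char (List Int))
    (hd : ∀ c, d.contains c = true → d.get? c = some (pvCandList blocks c)) :
    ∀ c, (chars.foldl (pvStep blocks) d).contains c = true →
      (chars.foldl (pvStep blocks) d).get? c = some (pvCandList blocks c) := by
  induction chars generalizing d with
  | nil => exact hd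
  | cons ch rest ih =>
    intro c hc
    refine ih (pvStep blocks d ch) ?_ c hc
    intro c' hc'
    simp only [pvStep] at hc' ⊢
    by_cases h : d.contains ch = true
    · simp only [h, if_true] at hc' ⊢; exact hd c' hc'
    · simp only [h, Bool.false_eq_true, if_false] at hc' ⊢
      rw [PySem.Dict.get?_insert]
      by_cases he : c' = ch
      · simp [he]
      · simp only [he, if_false]
        rw [PySem.Dict.contains_insert, Bool.or_eq_true] at hc'
        rcases hc' with hbe | hdc
        · exact absurd (eq_of_beq hbe) he
        · exact hd c' hdc

lemma pvStep_contains_mono (blocks : List String) (d : PySem.Dict Char (List Int)) (ch c : Char)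
    (h : d.contains c = true) : (pvStep blocks d ch).contains c = true := by
  simp only [pvStep]
  by_cases hch : d.contains ch = true
  · simp [hch, h]
  · simp [hch, PySem.Dict.contains_insert, h]

lemma pvFoldl_contains_of_mem (blocks : List String) (chars : List Char)
    (d : PySem.Dict Char (List Int)) (c : Char) (h : c ∈ chars) :
    (chars.foldl (pvStep blocks) d).contains c = true := by
  induction chars generalizing d with
  | nil => cases h
  | cons ch rest ih =>
    rcases List.mem_cons.mp h with rfl | hmem
    · simp only [List.foldl_cons]
      have hc : (pvStep blocks d c).contains c = true := by
        simp only [pvStep]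
        by_cases hch : d.contains c = true
        · simp [hch]
        · simp only [hch, Bool.false_eq_true, if_false, PySem.Dict.contains_insert,
            BEq.rfl, Bool.true_or]
      -- later steps keep the key
      clear h ih
      generalize pvStep blocks d c = d' at hc
      induction rest generalizing d' with
      | nil => simpa using hc
      | cons ch2 rest2 ih2 =>
        simp only [List.foldl_cons]
        exact ih2 _ (pvStep_contains_mono blocks d' ch2 c hc)
    · simp only [List.foldl_cons]; exact ih _ hmem

-- every message character is a key of B's dict, mapped to its candidate list
lemma pvBuildCands_get? (blocks : List String) (message : String) (c : Char)
    (h : c ∈ message.toList) :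
    (pvBuildCands blocks message).get? c = some (pvCandList blocks c) := by
  rw [pvBuildCands_eq_foldl]
  refine pvStep_inv blocks message.toList PySem.Dict.empty ?_ c ?_
  · intro c' hc'; simp [PySem.Dict.contains_empty] at hc'
  · exact pvFoldl_contains_of_mem blocks message.toList PySem.Dict.empty c h

-- reduction lemmas for the two mutual definitions (the named-match unfoldings)
lemma pvBacktrack_base (blocks : List String) (msg : List Char) (index : Nat) (cur : List Int)
    (h : index = msg.length) : pvBacktrack blocks msg index cur = some cur := by
  rw [pvBacktrack, if_pos h]

lemma pvBacktrack_oob (blocks : List String) (msg : List Char) (index : Nat) (cur : List Int)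
    (h : ¬ index = msg.length) (hg : msg[index]? = none) :
    pvBacktrack blocks msg index cur = none := by
  rw [pvBacktrack, if_neg h]
  split
  · rfl
  · rename_i c heq; rw [heq] at hg; cases hg

lemma pvBacktrack_step (blocks : List String) (msg : List Char) (index : Nat) (cur : List Int)
    (c : Char) (h : ¬ index = msg.length) (hg : msg[index]? = some c) :
    pvBacktrack blocks msg index cur
      = pvLoopA blocks msg index cur c (PySem.List.enumerate blocks 0) (pvIdxLt hg) := by
  rw [pvBacktrack, if_neg h]
  split
  · rename_i heq; rw [heq] at hg; cases hg
  · rename_i c' heq; rw [heq] at hg; injection hg with hg'; subst hg'; rfl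

lemma pvSolve_base (cands : PySem.Dict Char (List Int)) (msg : List Char) (index : Nat)
    (used : PySem.Set Int) (h : index = msg.length) :
    pvSolve cands msg index used = some [] := by
  rw [pvSolve, if_pos h]

lemma pvSolve_oob (cands : PySem.Dict Char (List Int)) (msg : List Char) (index : Nat)
    (used : PySem.Set Int) (h : ¬ index = msg.length) (hg : msg[index]? = none) :
    pvSolve cands msg index used = none := by
  rw [pvSolve, if_neg h]
  split
  · rfl
  · rename_i c heq; rw [heq] at hg; cases hg

lemma pvSolve_step (cands : PySem.Dict Char (List Int)) (msg : List Char) (index : Nat)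
    (used : PySem.Set Int) (c : Char) (l : List Int)
    (h : ¬ index = msg.length) (hg : msg[index]? = some c) (hk : cands.get? c = some l) :
    pvSolve cands msg index used = pvLoopB cands msg index used l (pvIdxLt hg) := by
  rw [pvSolve, if_neg h]
  split
  · rename_i heq; rw [heq] at hg; cases hg
  · rename_i c' heq; rw [heq] at hg; injection hg with hg'; subst hg'
    rw [hk]

-- loop-unfolding helpers for the two inner for-loops
lemma pvLoopA_nil (blocks : List String) (msg : List Char) (index : Nat) (cur : List Int)
    (c : Char) (hidx : index < msg.length) : pvLoopA blocks msg index cur c [] hidx = none := by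
  rw [pvLoopA]

lemma pvLoopA_skip (blocks : List String) (msg : List Char) (index : Nat) (cur : List Int)
    (c : Char) (hidx : index < msg.length) (i : Int) (b : String) (rest : List (Int × String))
    (hcond : (!(cur.contains i) && pvCanSpell b c) = false) :
    pvLoopA blocks msg index cur c ((i, b) :: rest) hidx
      = pvLoopA blocks msg index cur c rest hidx := by
  rw [pvLoopA]; simp only [hcond, Bool.false_eq_true, if_false]

lemma pvLoopA_go (blocks : List String) (msg : List Char) (index : Nat) (cur : List Int)
    (c : Char) (hidx : index < msg.length) (i : Int) (b : String) (rest : List (Int × String))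
    (hcond : (!(cur.contains i) && pvCanSpell b c) = true) :
    pvLoopA blocks msg index cur c ((i, b) :: rest) hidx
      = match pvBacktrack blocks msg (index + 1) (cur ++ [i]) with
        | some r => if r.isEmpty then pvLoopA blocks msg index cur c rest hidx else some r
        | none => pvLoopA blocks msg index cur c rest hidx := by
  rw [pvLoopA]; simp only [hcond, if_true]

lemma pvLoopB_nil (cands : PySem.Dict Char (List Int)) (msg : List Char) (index : Nat)
    (used : PySem.Set Int) (hidx : index < msg.length) :
    pvLoopB cands msg index used [] hidx = none := by
  rw [pvLoopB]

lemma pvLoopB_skip (cands : PySem.Dict Char (List Int)) (msg : List Char) (index : Nat)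
    (used : PySem.Set Int) (hidx : index < msg.length) (i : Int) (rest : List Int)
    (hin : used.contains i = true) :
    pvLoopB cands msg index used (i :: rest) hidx = pvLoopB cands msg index used rest hidx := by
  rw [pvLoopB]; simp only [hin, if_true]

lemma pvLoopB_go (cands : PySem.Dict Char (List Int)) (msg : List Char) (index : Nat)
    (used : PySem.Set Int) (hidx : index < msg.length) (i : Int) (rest : List Int)
    (hin : used.contains i = false) :
    pvLoopB cands msg index used (i :: rest) hidx
      = match pvSolve cands msg (index + 1) (PySem.Set.add used i) with
        | some suffix => some (i :: suffix)
        | none => pvLoopB cands msg index used rest hidx := by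
  rw [pvLoopB]; simp only [hin, Bool.false_eq_true, if_false]

-- MAIN LEMMA: A's backtrack equals B's solve with the prefix prepended,
-- whenever 'cur' (A's ordering so far) and 'used' (B's set) have the same members
lemma pvMain (blocks : List String) (msg : List Char) (cands : PySem.Dict Char (List Int))
    (hc : ∀ c ∈ msg, cands.get? c = some (pvCandList blocks c)) :
    ∀ (fuel index : Nat) (cur used : List Int),
      msg.length - index ≤ fuel →
      (∀ j : Int, cur.contains j = used.contains j) →
      pvBacktrack blocks msg index cur
        = (pvSolve cands msg index used).map (fun suf => cur ++ suf) := by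
  intro fuel
  induction fuel with
  | zero =>
    intro index cur used hf hu
    by_cases h : index = msg.length
    · rw [pvBacktrack_base _ _ _ _ h, pvSolve_base _ _ _ _ h]; simp
    · have hgt : msg.length ≤ index := by omega
      have hg : msg[index]? = none := List.getElem?_eq_none hgt
      rw [pvBacktrack_oob _ _ _ _ h hg, pvSolve_oob _ _ _ _ h hg]; rfl
  | succ n ih =>
    intro index cur used hf hu
    by_cases h : index = msg.length
    · rw [pvBacktrack_base _ _ _ _ h, pvSolve_base _ _ _ _ h]; simp
    · cases hg : msg[index]? with
      | none => rw [pvBacktrack_oob _ _ _ _ h hg, pvSolve_oob _ _ _ _ h hg]; rfl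
      | some c =>
        have hcm : c ∈ msg := List.mem_of_getElem? hg
        rw [pvBacktrack_step _ _ _ _ _ h hg,
            pvSolve_step _ _ _ _ _ _ h hg (hc c hcm)]
        generalize pvIdxLt hg = hidx
        -- inner loop: A scans (a suffix of) enumerate(blocks), B scans its
        -- spell-filtered index image
        have loop : ∀ (l : List (Int × String)),
            pvLoopA blocks msg index cur c l hidx
              = (pvLoopB cands msg index used
                    ((l.filter (fun p => pvCanSpell p.2 c)).map (·.1)) hidx).map
                  (fun suf => cur ++ suf) := by
          intro l
          induction l with
          | nil =>
            simp only [List.filter_nil, List.map_nil]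
            rw [pvLoopA_nil, pvLoopB_nil]; rfl
          | cons p rest ihl =>
            obtain ⟨i, b⟩ := p
            by_cases hs : pvCanSpell b c = true
            · simp only [List.filter_cons, hs, if_true, List.map_cons]
              by_cases hin : cur.contains i = true
              · have hinu : used.contains i = true := by rw [← hu]; exact hin
                rw [pvLoopA_skip _ _ _ _ _ _ _ _ _ (by rw [hin]; rfl),
                    pvLoopB_skip _ _ _ _ _ _ _ hinu]
                exact ihl
              · have hin' : cur.contains i = false := by simpa using hin
                have hinu : used.contains i = false := by rw [← hu]; exact hin'
                rw [pvLoopA_go _ _ _ _ _ _ _ _ _ (by rw [hin', hs]; rfl),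
                    pvLoopB_go _ _ _ _ _ _ _ hinu]
                have hrec := ih (index + 1) (cur ++ [i]) (PySem.Set.add used i)
                  (by omega)
                  (by
                    intro j
                    have hadd : PySem.Set.add used i = used ++ [i] := by
                      simp only [PySem.Set.add, PySem.Set.contains, hinu,
                        Bool.false_eq_true, if_false]
                    rw [hadd, List.contains_append, List.contains_append, hu j])
                rw [hrec]
                cases hsol : pvSolve cands msg (index + 1) (PySem.Set.add used i) with
                | none => simpa using ihl
                | some suffix => simp [List.append_assoc]
            · have hs' : pvCanSpell b c = false := by simpa using hs
              rw [pvLoopA_skip _ _ _ _ _ _ _ _ _ (by rw [hs', Bool.and_false])]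
              simpa [List.filter_cons, hs'] using ihl
        rw [loop (PySem.List.enumerate blocks 0)]
        rfl

-- ===== VERDICT (by name: the statement is the Claim_ definition above) =====
theorem find_block_ordering_spec : Claim_equal_find_block_ordering := by
  intro blocks message _
  unfold Spec_find_block_ordering find_block_ordering find_block_ordering_alt
  have h := pvMain blocks message.toList (pvBuildCands blocks message)
    (fun c hcm => pvBuildCands_get? blocks message c hcm)
    (message.toList.length) 0 [] PySem.Set.empty (by omega)
    (by intro j; rfl)
  rw [h]
  cases pvSolve (pvBuildCands blocks message) message.toList 0 PySem.Set.empty <;> simp
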